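-- pv_equiv track=rewrite | github.com/Ahmeddhouib1/stage | main.py | group_blocks
-- ===== SOURCE A (Python) =====
-- def group_blocks(lines):
--     blocks = []
--     current = []
--     for line in lines:
--         if line.startswith(("Given", "When", "Then", "And", "But")) or "Axium" in line or "Element" in line:
--             if current:
--                 blocks.append("\n".join(current))
--                 current = []
--         current.append(line)
--     if current:
--         blocks.append("\n".join(current))
--     return blocks
-- ===== SOURCE B (Python) =====
-- def _is_header(line):
--     return line.startswith(("Given", "When", "Then", "And", "But")) or "Axium" in line or "Element" in line
--
--
-- def group_blocks(lines):
--     blocks = []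
--     n = len(lines)
--     i = 0
--     while i < n:
--         j = i + 1
--         while j < n and not _is_header(lines[j]):
--             j += 1
--         blocks.append("\n".join(lines[i:j]))
--         i = j
--     return blocks
-- ===== Notes on version B (the rewrite author's own statement) =====
-- stated objective: alternative
-- what changed: Replaces A's running `current` accumulator with a two-pointer scan: an inner loop finds the end index of each block, which is then taken as one slice lines[i:j], so no per-line list building occurs.
import Mathlib
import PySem

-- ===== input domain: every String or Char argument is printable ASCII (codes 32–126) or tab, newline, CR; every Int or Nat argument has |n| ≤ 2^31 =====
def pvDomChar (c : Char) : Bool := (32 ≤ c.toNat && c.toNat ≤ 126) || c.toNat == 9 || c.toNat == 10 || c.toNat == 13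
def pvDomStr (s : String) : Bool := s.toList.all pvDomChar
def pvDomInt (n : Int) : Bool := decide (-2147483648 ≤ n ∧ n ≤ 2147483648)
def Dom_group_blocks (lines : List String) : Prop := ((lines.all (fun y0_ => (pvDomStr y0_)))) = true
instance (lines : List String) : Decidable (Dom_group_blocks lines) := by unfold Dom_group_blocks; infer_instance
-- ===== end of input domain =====

-- B replaces A's running `current` accumulator with a two-pointer index scan that emits each block as one slice (alternative decomposition, same cost).

-- ===== PORT A =====
def pvHeaderA (line : String) : Bool :=
  PySem.Str.startswith line "Given" || PySem.Str.startswith line "When" ||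
  PySem.Str.startswith line "Then" || PySem.Str.startswith line "And" ||
  PySem.Str.startswith line "But" ||
  PySem.Str.isIn "Axium" line || PySem.Str.isIn "Element" line

def pvStepA (st : List String × List String) (line : String) : List String × List String :=
  let st1 := if pvHeaderA line then
               (if st.2.isEmpty then st else (st.1 ++ [PySem.Str.join "\n" st.2], []))
             else st
  (st1.1, st1.2 ++ [line])

def group_blocks (lines : List String) : List String :=
  let st := lines.foldl pvStepA ([], [])
  if st.2.isEmpty then st.1 else st.1 ++ [PySem.Str.join "\n" st.2]

-- ===== PORT B =====
def pvHeaderB (line : String) : Bool :=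
  PySem.Str.startswith line "Given" || PySem.Str.startswith line "When" ||
  PySem.Str.startswith line "Then" || PySem.Str.startswith line "And" ||
  PySem.Str.startswith line "But" ||
  PySem.Str.isIn "Axium" line || PySem.Str.isIn "Element" line

-- inner `while j < n and not _is_header(lines[j])`; lines[j] is in range when read (j < n), so getD "" is exact
def pvScanB (lines : List String) (n j : Nat) : Nat :=
  if j < n then
    (if pvHeaderB (lines.getD j "") then j else pvScanB lines n (j + 1))
  else j
termination_by n - j

theorem pvScanB_le (lines : List String) (n j : Nat) : j ≤ pvScanB lines n j := by
  unfold pvScanB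
  split
  · split
    · exact le_refl j
    · exact le_trans (Nat.le_succ j) (pvScanB_le lines n (j + 1))
  · exact le_refl j
termination_by n - j

-- outer `while i < n` loop of B
def pvOuterB (lines : List String) (n i : Nat) (blocks : List String) : List String :=
  if _h : i < n then
    let j := pvScanB lines n (i + 1)
    pvOuterB lines n j
      (blocks ++ [PySem.Str.join "\n" (PySem.List.slice lines (some (i : Int)) (some (j : Int)))])
  else blocks
termination_by n - i
decreasing_by
  have := pvScanB_le lines n (i + 1)
  omega

def group_blocks_alt (lines : List String) : List String :=
  pvOuterB lines lines.length 0 []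

-- ===== PRECONDITION & SPEC =====
def Spec_group_blocks (lines : List String) (out : List String) : Prop := out = group_blocks_alt lines
instance (lines : List String) (out : List String) : Decidable (Spec_group_blocks lines out) := by unfold Spec_group_blocks; infer_instance

-- ===== CLAIM (what is proved, stated in full; the proofs are below) =====
def Claim_equal_group_blocks : Prop := ∀ (lines : List String), Dom_group_blocks lines → Spec_group_blocks lines (group_blocks lines)

-- ===== LEMMAS AND PROOFS =====

-- common characterisation: the maximal segments of `lines` (a new segment starts at each header line after position 0)
def pvGo (cur : List String) : List String → List (List String)
  | [] => [cur]
  | l :: ls => if pvHeaderA l then cur :: pvGo [l] ls else pvGo (cur ++ [l]) ls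

def pvSegs : List String → List (List String)
  | [] => []
  | l :: ls => pvGo [l] ls

theorem pvHeaderB_eq (l : String) : pvHeaderB l = pvHeaderA l := rfl

theorem pvGo_eq (ls : List String) : ∀ cur : List String,
    pvGo cur ls = (cur ++ ls.takeWhile (fun l => !pvHeaderA l)) ::
      pvSegs (ls.dropWhile (fun l => !pvHeaderA l)) := by
  induction ls with
  | nil => intro cur; simp [pvGo, pvSegs]
  | cons l ls ih =>
    intro cur
    by_cases h : pvHeaderA l
    · simp [pvGo, h, List.takeWhile, List.dropWhile, pvSegs]
    · simp only [pvGo, h, if_neg, Bool.not_eq_true, ih (cur ++ [l]),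
        List.takeWhile, List.dropWhile]
      simp [h]

theorem pvFoldA_eq (ls : List String) : ∀ blocks cur : List String, cur ≠ [] →
    (let st := ls.foldl pvStepA (blocks, cur);
     if st.2.isEmpty then st.1 else st.1 ++ [PySem.Str.join "\n" st.2]) =
    blocks ++ (pvGo cur ls).map (PySem.Str.join "\n") := by
  induction ls with
  | nil =>
    intro blocks cur hcur
    simp [List.foldl, pvGo, List.isEmpty_iff, hcur]
  | cons l ls ih =>
    intro blocks cur hcur
    have hne : cur.isEmpty = false := by simp [hcur]
    by_cases h : pvHeaderA l
    · have : pvStepA (blocks, cur) l = (blocks ++ [PySem.Str.join "\n" cur], [l]) := by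
        simp [pvStepA, h, hne]
      simp only [List.foldl_cons, this]
      rw [ih _ [l] (by simp)]
      simp [pvGo, h]
    · have : pvStepA (blocks, cur) l = (blocks, cur ++ [l]) := by
        simp [pvStepA, h]
      simp only [List.foldl_cons, this]
      rw [ih _ (cur ++ [l]) (by simp)]
      simp [pvGo, h]

theorem group_blocks_eq_segs (lines : List String) :
    group_blocks lines = (pvSegs lines).map (PySem.Str.join "\n") := by
  cases lines with
  | nil => simp [group_blocks, pvSegs]
  | cons l ls =>
    have h0 : pvStepA ([], []) l = ([], [l]) := by simp [pvStepA]
    have := pvFoldA_eq ls [] [l] (by simp)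
    simp only [group_blocks, List.foldl_cons, h0] at *
    simpa [pvSegs] using this

theorem pvScanB_eq (lines : List String) (j : Nat) :
    pvScanB lines lines.length j =
      j + ((lines.drop j).takeWhile (fun l => !pvHeaderA l)).length := by
  unfold pvScanB
  split
  · rename_i hj
    have hdrop : lines.drop j = lines[j] :: lines.drop (j + 1) :=
      (List.getElem_cons_drop hj).symm
    have hget : lines.getD j "" = lines[j] := by
      simp [List.getD, List.getElem?_eq_getElem hj]
    rw [pvHeaderB_eq, hget]
    by_cases h : pvHeaderA lines[j]
    · rw [if_pos h, hdrop, List.takeWhile_cons]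
      simp [h]
    · rw [if_neg h, pvScanB_eq lines (j + 1), hdrop, List.takeWhile_cons]
      simp [h]
      omega
  · rename_i hj
    rw [List.drop_eq_nil_of_le (by omega)]
    simp
termination_by lines.length - j

theorem pvOuterB_eq (lines : List String) (i : Nat) : ∀ blocks : List String,
    pvOuterB lines lines.length i blocks =
      blocks ++ (pvSegs (lines.drop i)).map (PySem.Str.join "\n") := by
  intro blocks
  unfold pvOuterB
  split
  · rename_i hi
    set t := ((lines.drop (i + 1)).takeWhile (fun l => !pvHeaderA l)).length with ht
    have hscan : pvScanB lines lines.length (i + 1) = i + 1 + t := pvScanB_eq lines (i + 1)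
    have hdrop : lines.drop i = lines[i] :: lines.drop (i + 1) :=
      (List.getElem_cons_drop hi).symm
    have htw : (lines.drop (i + 1)).take t = (lines.drop (i + 1)).takeWhile (fun l => !pvHeaderA l) := by
      exact (List.prefix_iff_eq_take.mp (List.takeWhile_prefix _)).symm
    have hslice : PySem.List.slice lines (some (i : Int)) (some ((i + 1 + t : Nat) : Int)) =
        lines[i] :: (lines.drop (i + 1)).takeWhile (fun l => !pvHeaderA l) := by
      rw [PySem.List.slice_natCast, hdrop]
      have : i + 1 + t - i = t + 1 := by omega
      rw [this, List.take_succ_cons, htw]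
    have hdropj : lines.drop (i + 1 + t) = (lines.drop (i + 1)).dropWhile (fun l => !pvHeaderA l) := by
      have h1 : lines.drop (i + 1 + t) = (lines.drop (i + 1)).drop t := List.drop_drop.symm
      rw [h1]
      conv_lhs => rw [← List.takeWhile_append_dropWhile (p := fun l => !pvHeaderA l) (l := lines.drop (i + 1))]
      exact List.drop_left' ht.symm
    rw [hscan, pvOuterB_eq lines (i + 1 + t), hslice, hdropj, hdrop]
    rw [pvSegs, pvGo_eq]
    simp
  · rename_i hi
    rw [List.drop_eq_nil_of_le (by omega)]
    simp [pvSegs]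
termination_by lines.length - i
decreasing_by
  have := pvScanB_le lines lines.length (i + 1)
  omega

-- ===== VERDICT (by name: the statement is the Claim_ definition above) =====
theorem group_blocks_spec : Claim_equal_group_blocks := by
  intro lines _
  unfold Spec_group_blocks group_blocks_alt
  rw [group_blocks_eq_segs, pvOuterB_eq]
  simp
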